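-- pv_equiv track=rewrite | github.com/payor-ma/spvs-calc | _conversions.py | stripZeroes
-- ===== SOURCE A (Python) =====
-- def sexListToSex(sexList):
--     return ".".join([str(i) for i in sexList]
--
-- )
--
-- def stripZeroes(sexStr):
--     sexList = sexStr.split(".")
--     for i in range(len(sexList)-1,0,-1):
--         if sexList[i] == "0":
--             sexList.pop(i)
--         else:
--             break
--     return sexListToSex(sexList)
-- ===== SOURCE B (Python) =====
-- def stripZeroes(sexStr):
--     while sexStr.endswith(".0"):
--         sexStr = sexStr[:-2]
--     return sexStr
-- ===== Notes on version B (the rewrite author's own statement) =====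
-- stated objective: idiomatic
-- what changed: A splits on '.', pops trailing '0' components off the list in an index loop with break and re-joins; B never builds a list and instead repeatedly strips the literal suffix '.0' from the string itself.
import Mathlib
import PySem

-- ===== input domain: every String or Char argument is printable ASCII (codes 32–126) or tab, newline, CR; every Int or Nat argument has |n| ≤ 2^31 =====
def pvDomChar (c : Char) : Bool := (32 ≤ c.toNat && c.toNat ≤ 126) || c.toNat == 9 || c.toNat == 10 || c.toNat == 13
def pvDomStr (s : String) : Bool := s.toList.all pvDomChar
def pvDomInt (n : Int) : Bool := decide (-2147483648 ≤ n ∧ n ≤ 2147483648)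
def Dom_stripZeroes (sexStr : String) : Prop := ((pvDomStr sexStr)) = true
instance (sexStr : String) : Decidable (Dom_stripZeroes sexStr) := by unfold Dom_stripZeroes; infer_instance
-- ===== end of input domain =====

-- B replaces A's split / pop-loop / join pipeline by stripping trailing ".0" components directly on the string (idiomatic; same cost).

-- ===== PORT A =====
-- '".".join([str(i) for i in sexList])' — str(i) on a string is the identity, kept as the map
def sexListToSex (sexList : List (List Char)) : List Char :=
  PySem.Chars.join ['.'] (sexList.map (fun i => i))

-- 'for i in range(len(sexList)-1,0,-1): if sexList[i] == "0": sexList.pop(i) else: break'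
def stripLoopA : List Int → List (List Char) → List (List Char)
  | [], l => l
  | i :: rest, l =>
    match PySem.List.pyGet? l i with
    | none => l          -- IndexError: unreachable for the indices A generates; kept total
    | some x =>
      if x = ['0'] then
        match PySem.List.pop? l i with
        | some (_, l') => stripLoopA rest l'
        | none => l      -- unreachable
      else l             -- break

def stripZeroes (sexStr : String) : String :=
  let sexList := PySem.Chars.splitOn sexStr.toList ['.']
  String.ofList (sexListToSex
    (stripLoopA (PySem.List.pyRange ((sexList.length : Int) - 1) 0 (-1)) sexList))

-- ===== PORT B =====
-- 'while sexStr.endswith(".0"): sexStr = sexStr[:-2]'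
def altLoop (cs : List Char) : List Char :=
  if h : PySem.Chars.endswith cs ['.', '0'] = true then
    altLoop (PySem.Chars.slice cs none (some (-2)))
  else cs
termination_by cs.length
decreasing_by
  simp only [PySem.Chars.endswith] at h
  have h2 : 2 ≤ cs.length := by
    have := List.IsSuffix.length_le (List.isSuffixOf_iff_suffix.mp h)
    simpa using this
  simp only [PySem.Chars.slice_eq_listSlice]
  rw [PySem.List.slice_to_neg_ofNat cs 2 (by omega)]
  simp only [List.length_take]
  omega

def stripZeroes_alt (sexStr : String) : String :=
  String.ofList (altLoop sexStr.toList)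

-- ===== PRECONDITION & SPEC =====
def Spec_stripZeroes (sexStr : String) (out : String) : Prop := out = stripZeroes_alt sexStr
instance (sexStr : String) (out : String) : Decidable (Spec_stripZeroes sexStr out) := by unfold Spec_stripZeroes; infer_instance

-- ===== CLAIM (what is proved, stated in full; the proofs are below) =====
def Claim_equal_stripZeroes : Prop := ∀ (sexStr : String), Dom_stripZeroes sexStr → Spec_stripZeroes sexStr (stripZeroes sexStr)

-- ===== LEMMAS AND PROOFS =====

def splitSpec : List Char → List Char → List (List Char)
  | [], cur => [cur.reverse]
  | c :: rest, cur =>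
    if c = '.' then cur.reverse :: splitSpec rest []
    else splitSpec rest (c :: cur)

theorem go_eq (fuel : Nat) (l cur : List Char) (acc : List (List Char))
    (h : l.length < fuel) :
    PySem.Chars.splitOn.go ['.'] fuel l cur acc = acc.reverse ++ splitSpec l cur := by
  induction fuel generalizing l cur acc with
  | zero => omega
  | succ n ih =>
    cases l with
    | nil => simp [PySem.Chars.splitOn.go, splitSpec]
    | cons c rest =>
      rw [PySem.Chars.splitOn.go]
      by_cases hc : c = '.'
      · subst hc
        have hp : List.isPrefixOf ['.'] ('.' :: rest) = true := by simp [List.isPrefixOf]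
        simp only [hp, if_pos]
        rw [show List.drop ['.'].length ('.' :: rest) = rest from rfl]
        rw [ih rest [] _ (by simp at h ⊢; omega)]
        simp [splitSpec]
      · rw [if_neg (by simp [List.isPrefixOf]; exact fun he => hc he.symm)]
        rw [ih rest (c :: cur) _ (by simp at h ⊢; omega)]
        simp [splitSpec, hc]

theorem splitOn_eq (cs : List Char) :
    PySem.Chars.splitOn cs ['.'] = splitSpec cs [] := by
  rw [PySem.Chars.splitOn, go_eq (cs.length + 1) cs [] [] (by omega)]
  simp

theorem splitSpec_ne_nil (l cur : List Char) : splitSpec l cur ≠ [] := by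
  induction l generalizing cur with
  | nil => simp [splitSpec]
  | cons c rest ih =>
    by_cases hc : c = '.' <;> simp [splitSpec, hc, ih]

theorem intercalate_cons2 (x y : List Char) (xs : List (List Char)) :
    List.intercalate ['.'] (x :: y :: xs) = x ++ '.' :: List.intercalate ['.'] (y :: xs) := by
  simp [List.intercalate, List.intersperse]

theorem join_splitSpec (l cur : List Char) :
    List.intercalate ['.'] (splitSpec l cur) = cur.reverse ++ l := by
  induction l generalizing cur with
  | nil => simp [splitSpec, List.intercalate]
  | cons c rest ih =>
    by_cases hc : c = '.'
    · subst hc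
      rw [show splitSpec ('.' :: rest) cur = cur.reverse :: splitSpec rest [] from by
        simp [splitSpec]]
      rcases he : splitSpec rest [] with _ | ⟨p, ps⟩
      · exact absurd he (splitSpec_ne_nil rest [])
      · have hIH := ih ([])
        rw [he] at hIH
        rw [intercalate_cons2, hIH]
        simp
    · simp only [splitSpec, if_neg hc]
      rw [ih (c :: cur)]
      simp

theorem splitSpec_no_dot (l cur : List Char) (hc : '.' ∉ cur) :
    ∀ p ∈ splitSpec l cur, '.' ∉ p := by
  induction l generalizing cur with
  | nil => simpa [splitSpec] using hc
  | cons c rest ih =>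
    by_cases h : c = '.'
    · subst h
      rw [show splitSpec ('.' :: rest) cur = cur.reverse :: splitSpec rest [] from by
        simp [splitSpec]]
      intro p hp
      rcases List.mem_cons.mp hp with hp | hp
      · subst hp; simpa using hc
      · exact ih [] (by simp) p hp
    · simp only [splitSpec, if_neg h]
      exact ih (c :: cur) (by simp [hc]; exact fun he => h he.symm)
def trimR (t : List (List Char)) : List (List Char) :=
  (t.reverse.dropWhile (· = ['0'])).reverse

def stripTrail : List (List Char) → List (List Char)
  | [] => []
  | h :: t => h :: trimR t

theorem stripTrail_append_zero (init : List (List Char)) (h : init ≠ []) :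
    stripTrail (init ++ [['0']]) = stripTrail init := by
  rcases init with _ | ⟨y, t⟩
  · exact absurd rfl h
  · simp [stripTrail, trimR]

theorem stripTrail_append_ne (init : List (List Char)) (x : List Char)
    (h : init ≠ []) (hx : x ≠ ['0']) :
    stripTrail (init ++ [x]) = init ++ [x] := by
  rcases init with _ | ⟨y, t⟩
  · exact absurd rfl h
  · simp [stripTrail, trimR, hx]

theorem eraseIdx_concat_self (init : List (List Char)) (x : List Char) :
    (init ++ [x]).eraseIdx init.length = init := by
  induction init with
  | nil => rfl
  | cons y t ih => simpa [List.eraseIdx] using ih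

theorem loopA_eq (n : Nat) : ∀ l : List (List Char), l.length = n + 1 →
    stripLoopA (PySem.List.pyRange (n : Int) 0 (-1)) l = stripTrail l := by
  induction n with
  | zero =>
    intro l hl
    rcases l with _ | ⟨x, t⟩
    · simp at hl
    · have ht : t = [] := by simpa using hl
      subst ht
      rw [PySem.List.pyRange_neg_one_eq_nil (by omega)]
      simp [stripLoopA, stripTrail, trimR]
  | succ n ih =>
    intro l hl
    rcases List.eq_nil_or_concat l with hnil | ⟨init, x, hcat⟩
    · simp [hnil] at hl
    · subst hcat
      simp only [List.concat_eq_append] at hl ⊢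
      have hlen : init.length = n + 1 := by simp at hl; omega
      have hne : init ≠ [] := by intro h; simp [h] at hlen
      rw [PySem.List.pyRange_neg_one_cons (by push_cast; omega)]
      rw [show ((n + 1 : Nat) : Int) - 1 = ((n : Nat) : Int) from by push_cast; ring]
      simp only [stripLoopA]
      rw [PySem.List.pyGet?_natCast]
      rw [← hlen, List.getElem?_concat_length]
      by_cases hx : x = ['0']
      · simp only [hx, if_true]
        rw [PySem.List.pop?_natCast _ _ (by simp)]
        simp only [eraseIdx_concat_self]
        rw [ih init hlen, stripTrail_append_zero init hne]
      · simp only [hx, if_false]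
        rw [stripTrail_append_ne init x hne hx]

theorem intercalate_append_last (init : List (List Char)) (x : List Char) (h : init ≠ []) :
    List.intercalate ['.'] (init ++ [x]) = List.intercalate ['.'] init ++ '.' :: x := by
  induction init with
  | nil => exact absurd rfl h
  | cons y t ih =>
    rcases t with _ | ⟨z, t'⟩
    · simp [List.intercalate]
    · rw [show (y :: z :: t') ++ [x] = y :: z :: (t' ++ [x]) from by simp,
        intercalate_cons2, show z :: (t' ++ [x]) = (z :: t') ++ [x] from rfl,
        ih (by simp), intercalate_cons2]
      simp

theorem not_endswith (J x : List Char) (hx : x ≠ ['0']) (hdot : '.' ∉ x) :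
    PySem.Chars.endswith (J ++ '.' :: x) ['.', '0'] = false := by
  rw [Bool.eq_false_iff]
  intro h
  obtain ⟨t, ht⟩ := (PySem.Chars.endswith_iff _ _).mp h
  rcases List.eq_nil_or_concat x with hnil | ⟨x', c, hcx⟩
  · subst hnil
    have := congrArg List.getLast? ht
    rw [show t ++ ['.', '0'] = (t ++ ['.']) ++ ['0'] from by simp,
      List.getLast?_concat, List.getLast?_concat] at this
    simp at this
  · subst hcx
    simp only [List.concat_eq_append] at ht hx hdot ⊢
    have hc : c = '0' := by
      have := congrArg List.getLast? ht
      rw [show t ++ ['.', '0'] = (t ++ ['.']) ++ ['0'] from by simp,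
        show J ++ '.' :: (x' ++ [c]) = (J ++ '.' :: x') ++ [c] from by simp,
        List.getLast?_concat, List.getLast?_concat] at this
      simpa using this.symm
    have hdl := congrArg List.dropLast ht
    rw [show t ++ ['.', '0'] = (t ++ ['.']) ++ ['0'] from by simp,
      show J ++ '.' :: (x' ++ [c]) = (J ++ '.' :: x') ++ [c] from by simp,
      List.dropLast_concat, List.dropLast_concat] at hdl
    rcases List.eq_nil_or_concat x' with hnil' | ⟨x'', d, hdx⟩
    · subst hnil'
      exact hx (by simp [hc])
    · subst hdx
      simp only [List.concat_eq_append] at hdl hdot ⊢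
      have := congrArg List.getLast? hdl
      rw [List.getLast?_concat,
        show J ++ '.' :: (x'' ++ [d]) = (J ++ '.' :: x'') ++ [d] from by simp,
        List.getLast?_concat] at this
      have hd : d = '.' := by simpa using this.symm
      exact hdot (by subst hd; simp)

theorem altLoop_eq (n : Nat) : ∀ l : List (List Char), l.length = n + 1 →
    (∀ p ∈ l, '.' ∉ p) →
    altLoop (List.intercalate ['.'] l) = List.intercalate ['.'] (stripTrail l) := by
  induction n with
  | zero =>
    intro l hl hdot
    rcases l with _ | ⟨x, t⟩
    · simp at hl
    · have ht : t = [] := by simpa using hl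
      subst ht
      rw [show List.intercalate ['.'] [x] = x from by simp [List.intercalate]]
      rw [altLoop, dif_neg]
      · simp [stripTrail, trimR, List.intercalate]
      · intro h
        obtain ⟨t, ht⟩ := (PySem.Chars.endswith_iff _ _).mp h
        exact hdot x (by simp) (by rw [← ht]; simp)
  | succ n ih =>
    intro l hl hdot
    rcases List.eq_nil_or_concat l with hnil | ⟨init, x, hcat⟩
    · simp [hnil] at hl
    · subst hcat
      simp only [List.concat_eq_append] at hl hdot ⊢
      have hlen : init.length = n + 1 := by simp at hl; omega
      have hne : init ≠ [] := by intro h; simp [h] at hlen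
      rw [intercalate_append_last init x hne]
      by_cases hx : x = ['0']
      · subst hx
        rw [altLoop, dif_pos]
        · rw [show List.intercalate ['.'] init ++ '.' :: ['0']
              = List.intercalate ['.'] init ++ ['.', '0'] from by simp]
          simp only [PySem.Chars.slice_eq_listSlice]
          rw [PySem.List.slice_to_neg_ofNat _ 2 (by omega)]
          rw [show (List.intercalate ['.'] init ++ ['.', '0']).length - 2
              = (List.intercalate ['.'] init).length from by simp]
          rw [List.take_left]
          rw [ih init hlen (fun p hp => hdot p (by simp [hp]))]
          rw [stripTrail_append_zero init hne]
        · rw [show List.intercalate ['.'] init ++ '.' :: ['0']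
              = List.intercalate ['.'] init ++ ['.', '0'] from by simp]
          exact (PySem.Chars.endswith_iff _ _).mpr (List.suffix_append _ _)
      · rw [altLoop, dif_neg]
        · rw [stripTrail_append_ne init x hne hx, intercalate_append_last init x hne]
        · rw [not_endswith (List.intercalate ['.'] init) x hx
            (hdot x (by simp))]
          simp
theorem main_eq (s : String) : stripZeroes s = stripZeroes_alt s := by
  unfold stripZeroes stripZeroes_alt
  have hsp := splitOn_eq s.toList
  set L := PySem.Chars.splitOn s.toList ['.'] with hL
  have hne : L ≠ [] := by rw [hsp]; exact splitSpec_ne_nil _ _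
  have hlen : L.length = (L.length - 1) + 1 := by
    rcases L with _ | _
    · exact absurd rfl hne
    · simp
  have hcast : ((L.length : Int) - 1) = ((L.length - 1 : Nat) : Int) := by
    rcases L with _ | _
    · exact absurd rfl hne
    · simp
  show String.ofList (sexListToSex
      (stripLoopA (PySem.List.pyRange ((L.length : Int) - 1) 0 (-1)) L)) =
    String.ofList (altLoop s.toList)
  rw [hcast, loopA_eq (L.length - 1) L hlen]
  have hdot : ∀ p ∈ L, '.' ∉ p := by
    rw [hsp]; exact splitSpec_no_dot _ _ (by simp)
  have hjoin : List.intercalate ['.'] L = s.toList := by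
    rw [hsp]; simpa using join_splitSpec s.toList []
  have := altLoop_eq (L.length - 1) L hlen hdot
  rw [hjoin] at this
  rw [this]
  simp [sexListToSex, PySem.Chars.join]

-- ===== VERDICT (by name: the statement is the Claim_ definition above) =====
theorem stripZeroes_spec : Claim_equal_stripZeroes := by
  intro s _
  exact main_eq s
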